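-- pv_equiv track=rewrite | github.com/c3c3l14/ilo-sitelen-kanata | sitelenkanata.py | replace_indigenous_with_latin
-- ===== SOURCE A (Python) =====
-- def replace_indigenous_with_latin(text, characters_dict):
--     result = ''
--     i = 0
--     while i < len(text):
--         # Check for pairs of indigenous characters
--         current_pair = text[i:i+2]
--         if current_pair in characters_dict.values():
--             # Replace with the corresponding Latin character
--             latin_char = next(key for key, value in characters_dict.items() if value == current_pair)
--             result += latin_char
--             i += 2  # Skip the next character in the pair
--         else:
--             # If not a pair, check for single indigenous characters
--             if text[i] in characters_dict.values():
--                 latin_char = next(key for key, value in characters_dict.items() if value == text[i])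
--                 result += latin_char
--             else:
--                 result += text[i]
--             i += 1
--     return result
-- ===== SOURCE B (Python) =====
-- def replace_indigenous_with_latin(text, characters_dict):
--     # Stage 1: invert the dict once (first key wins for duplicate values),
--     # split by value length (only lengths 1 and 2 can ever match).
--     pairs = {}
--     singles = {}
--     for key, value in characters_dict.items():
--         if len(value) == 2:
--             pairs.setdefault(value, key)
--         elif len(value) == 1:
--             singles.setdefault(value, key)
--     # Stage 2: one uniform character-stream fold with a one-char lookbehind
--     # buffer (no index arithmetic, no slicing, no variable-size steps).
--     out = []
--     prev = None
--     for c in text: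
--         if prev is None:
--             prev = c
--         elif prev + c in pairs:
--             out.append(pairs[prev + c])
--             prev = None
--         else:
--             out.append(singles.get(prev, prev))
--             prev = c
--     if prev is not None:
--         out.append(singles.get(prev, prev))
--     return ''.join(out)
-- ===== Notes on version B (the rewrite author's own statement) =====
-- stated objective: faster
-- what changed: Inverts the dict once into two value->first-key maps (by value length 2 vs 1) and then processes the text as a uniform per-character stream fold with a one-character lookbehind buffer and a final flush, instead of A's index-jumping while-loop that rescans dict.values()/items() at every position.
import Mathlib
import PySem

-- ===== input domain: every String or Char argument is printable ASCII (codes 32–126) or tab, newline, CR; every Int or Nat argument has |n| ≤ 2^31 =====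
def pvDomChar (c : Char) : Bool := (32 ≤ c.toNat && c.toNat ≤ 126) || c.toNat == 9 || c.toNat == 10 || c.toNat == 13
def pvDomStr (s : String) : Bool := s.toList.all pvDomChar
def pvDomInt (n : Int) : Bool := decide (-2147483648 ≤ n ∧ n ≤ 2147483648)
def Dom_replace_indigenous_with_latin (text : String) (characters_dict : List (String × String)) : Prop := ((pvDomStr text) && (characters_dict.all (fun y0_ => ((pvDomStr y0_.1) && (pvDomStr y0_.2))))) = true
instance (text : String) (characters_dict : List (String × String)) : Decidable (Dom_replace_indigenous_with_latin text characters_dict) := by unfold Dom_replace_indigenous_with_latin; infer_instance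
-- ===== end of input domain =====

-- B inverts the dict once into two value->first-key maps (by value length) and then makes a
-- uniform per-character stream fold with a one-character lookbehind buffer and a final flush,
-- instead of A's index-jumping while-loop that rescans the dict's values/items at each position.
-- Equality of the RETURN value is proved; neither program mutates its arguments.

-- ===== PORT A =====
-- A's loop over index i, transcribed as recursion on the remaining characters;
-- text[i:i+2] is 'c :: rest.take 1'. 'next(key for ...)' is the first items-pair whose
-- value equals the probe (List.find?); it is only evaluated under the membership guard,
-- so the '.getD ""' default is never the result.
def pvLoopA (items : List (String × String)) : List Char → List Char
  | [] => []
  | c :: rest =>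
    let current_pair := String.ofList (c :: rest.take 1)
    if current_pair ∈ items.map (·.2) then
      (((items.find? (fun kv => kv.2 == current_pair)).map (·.1)).getD "").toList
        ++ pvLoopA items (rest.drop 1)
    else if String.ofList [c] ∈ items.map (·.2) then
      (((items.find? (fun kv => kv.2 == String.ofList [c])).map (·.1)).getD "").toList
        ++ pvLoopA items rest
    else
      c :: pvLoopA items rest
  termination_by t => t.length
  decreasing_by all_goals simp

def replace_indigenous_with_latin (text : String) (characters_dict : List (String × String)) : String :=
  String.ofList (pvLoopA (PySem.Dict.ofList characters_dict).items text.toList)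

-- ===== PORT B =====
-- stage 1: the for-loop over characters_dict.items() building the two reverse maps with setdefault
def pvMaps (items : List (String × String)) : PySem.Dict String String × PySem.Dict String String :=
  items.foldl (fun m kv =>
    if PySem.Str.len kv.2 = 2 then (m.1.setdefault kv.2 kv.1, m.2)
    else if PySem.Str.len kv.2 = 1 then (m.1, m.2.setdefault kv.2 kv.1)
    else m) (PySem.Dict.empty, PySem.Dict.empty)

-- stage 2: the body of 'for c in text', state = (out, prev)
def pvStepB (pairs singles : PySem.Dict String String)
    (st : List String × Option Char) (c : Char) : List String × Option Char :=
  match st.2 with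
  | none => (st.1, some c)
  | some p =>
    match pairs.get? (String.ofList [p, c]) with
    | some k => (st.1 ++ [k], none)
    | none =>
      (st.1 ++ [((singles.get? (String.ofList [p])).getD (String.ofList [p]))], some c)

-- the final 'if prev is not None' flush
def pvFlush (singles : PySem.Dict String String) (st : List String × Option Char) : List String :=
  match st.2 with
  | none => st.1
  | some p => st.1 ++ [((singles.get? (String.ofList [p])).getD (String.ofList [p]))]

def replace_indigenous_with_latin_alt (text : String) (characters_dict : List (String × String)) : String :=
  let m := pvMaps (PySem.Dict.ofList characters_dict).items
  PySem.Str.join "" (pvFlush m.2 (text.toList.foldl (pvStepB m.1 m.2) ([], none)))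

-- ===== PRECONDITION & SPEC =====
def Spec_replace_indigenous_with_latin (text : String) (characters_dict : List (String × String)) (out : String) : Prop := out = replace_indigenous_with_latin_alt text characters_dict
instance (text : String) (characters_dict : List (String × String)) (out : String) : Decidable (Spec_replace_indigenous_with_latin text characters_dict out) := by unfold Spec_replace_indigenous_with_latin; infer_instance

-- ===== CLAIM (what is proved, stated in full; the proofs are below) =====
def Claim_equal_replace_indigenous_with_latin : Prop := ∀ (text : String) (characters_dict : List (String × String)), Dom_replace_indigenous_with_latin text characters_dict → Spec_replace_indigenous_with_latin text characters_dict (replace_indigenous_with_latin text characters_dict)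

-- ===== LEMMAS AND PROOFS =====

-- the first key whose value equals v, as A computes it
def pvFirstKey (items : List (String × String)) (v : String) : Option String :=
  (items.find? (fun kv => kv.2 == v)).map (·.1)

lemma pvStrLen_eq (s : String) : PySem.Str.len s = (s.toList.length : Int) := by
  simp [PySem.Str.len_eq]

lemma pvStr_ne_of_len_ne {a b : String} (h : a.toList.length ≠ b.toList.length) : a ≠ b := by
  intro he; exact h (by rw [he])

-- the fold building pvMaps: the pairs map answers pvFirstKey for 2-char probes,
-- the singles map for 1-char probes
lemma pvMapsFold_get? (items : List (String × String)) (p0 s0 : PySem.Dict String String)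
    (x : String) :
    (x.toList.length = 2 →
      ((items.foldl (fun m kv =>
        if PySem.Str.len kv.2 = 2 then (m.1.setdefault kv.2 kv.1, m.2)
        else if PySem.Str.len kv.2 = 1 then (m.1, m.2.setdefault kv.2 kv.1)
        else m) (p0, s0)).1).get? x = ((p0.get? x).or (pvFirstKey items x)))
    ∧ (x.toList.length = 1 →
      ((items.foldl (fun m kv =>
        if PySem.Str.len kv.2 = 2 then (m.1.setdefault kv.2 kv.1, m.2)
        else if PySem.Str.len kv.2 = 1 then (m.1, m.2.setdefault kv.2 kv.1)
        else m) (p0, s0)).2).get? x = ((s0.get? x).or (pvFirstKey items x))) := by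
  induction items generalizing p0 s0 with
  | nil => simp [pvFirstKey]
  | cons kv rest ih =>
    obtain ⟨k, v⟩ := kv
    constructor
    · intro hx2
      by_cases hv2 : PySem.Str.len v = 2
      · simp only [List.foldl_cons, if_pos hv2]
        rw [(ih (p0.setdefault v k) s0).1 hx2]
        by_cases hxv : x = v
        · subst hxv
          rw [PySem.Dict.get?_setdefault_self]
          cases h : p0.get? x <;> simp [pvFirstKey]
        · rw [PySem.Dict.get?_setdefault_of_ne _ _ hxv]
          have : (v == x) = false := by simp [(Ne.symm hxv)]
          simp [pvFirstKey, this]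
      · have hvne : v ≠ x := by
          apply pvStr_ne_of_len_ne
          rw [hx2]; intro hc
          exact hv2 (by rw [pvStrLen_eq, hc]; norm_num)
        have hfind : ((v : String) == x) = false := by simp [hvne]
        by_cases hv1 : PySem.Str.len v = 1
        · simp only [List.foldl_cons, if_neg hv2, if_pos hv1]
          rw [(ih p0 (s0.setdefault v k)).1 hx2]
          simp [pvFirstKey, hfind]
        · simp only [List.foldl_cons, if_neg hv2, if_neg hv1]
          rw [(ih p0 s0).1 hx2]
          simp [pvFirstKey, hfind]
    · intro hx1
      by_cases hv1 : PySem.Str.len v = 1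
      · have hv2 : ¬ PySem.Str.len v = 2 := by rw [hv1]; intro h; cases h
        simp only [List.foldl_cons, if_neg hv2, if_pos hv1]
        rw [(ih p0 (s0.setdefault v k)).2 hx1]
        by_cases hxv : x = v
        · subst hxv
          rw [PySem.Dict.get?_setdefault_self]
          cases h : s0.get? x <;> simp [pvFirstKey]
        · rw [PySem.Dict.get?_setdefault_of_ne _ _ hxv]
          have : (v == x) = false := by simp [(Ne.symm hxv)]
          simp [pvFirstKey, this]
      · have hvne : v ≠ x := by
          apply pvStr_ne_of_len_ne
          rw [hx1]; intro hc
          exact hv1 (by rw [pvStrLen_eq, hc]; norm_num)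
        have hfind : ((v : String) == x) = false := by simp [hvne]
        by_cases hv2 : PySem.Str.len v = 2
        · simp only [List.foldl_cons, if_pos hv2]
          rw [(ih (p0.setdefault v k) s0).2 hx1]
          simp [pvFirstKey, hfind]
        · simp only [List.foldl_cons, if_neg hv2, if_neg hv1]
          rw [(ih p0 s0).2 hx1]
          simp [pvFirstKey, hfind]

lemma pvPairs_get? (items : List (String × String)) (x : String) (hx : x.toList.length = 2) :
    (pvMaps items).1.get? x = pvFirstKey items x := by
  have := (pvMapsFold_get? items PySem.Dict.empty PySem.Dict.empty x).1 hx
  simpa [pvMaps, PySem.Dict.get?_empty] using this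

lemma pvSingles_get? (items : List (String × String)) (x : String) (hx : x.toList.length = 1) :
    (pvMaps items).2.get? x = pvFirstKey items x := by
  have := (pvMapsFold_get? items PySem.Dict.empty PySem.Dict.empty x).2 hx
  simpa [pvMaps, PySem.Dict.get?_empty] using this

-- A's membership test 'x in values()' is the isSome of A's own 'next(...)'
lemma pvMem_values_iff (items : List (String × String)) (x : String) :
    x ∈ items.map (·.2) ↔ (pvFirstKey items x).isSome := by
  simp only [pvFirstKey, Option.isSome_map, List.find?_isSome, List.mem_map]
  constructor
  · rintro ⟨kv, hm, he⟩; exact ⟨kv, hm, by simp [he]⟩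
  · rintro ⟨kv, hm, he⟩; exact ⟨kv, hm, by simpa using he⟩

lemma pvLoopA_nil (items : List (String × String)) : pvLoopA items [] = [] := by
  rw [pvLoopA]

-- the flattened output of B's single-char translation, as pvLoopA computes it on one char
lemma pvSingle_eq (items : List (String × String)) (p : Char) :
    (((pvMaps items).2.get? (String.ofList [p])).getD (String.ofList [p])).toList
      = pvLoopA items [p] := by
  have h1 : (String.ofList [p]).toList.length = 1 := by simp
  rw [pvSingles_get? items _ h1, pvLoopA]
  simp only [List.take_nil, List.drop_nil]
  cases h : items.find? (fun kv => kv.2 == String.ofList [p]) with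
  | none =>
    have hm : ¬ (String.ofList [p] ∈ items.map (·.2)) := by
      simp [pvMem_values_iff, pvFirstKey, h]
    simp [hm, pvFirstKey, h, pvLoopA_nil]
  | some kv =>
    have hm : String.ofList [p] ∈ items.map (·.2) := by
      simp [pvMem_values_iff, pvFirstKey, h]
    simp [hm, pvFirstKey, h, pvLoopA_nil]

-- ''.join on List Char level
lemma pvJoinNil_flatten (l : List (List Char)) : PySem.Chars.join [] l = l.flatten := by
  induction l with
  | nil => exact PySem.Chars.join_nil []
  | cons a t ih =>
    cases t with
    | nil => simp [PySem.Chars.join_singleton]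
    | cons b r => rw [PySem.Chars.join_cons_cons]; simp_all

-- the loop invariant of B's stream fold: whatever remains in the buffer, the flushed output
-- is the already-emitted prefix followed by A's translation of buffer ++ remaining text
lemma pvFoldB_eq (items : List (String × String)) :
    ∀ (t : List Char) (acc : List String) (buf : Option Char),
      ((pvFlush (pvMaps items).2
          (t.foldl (pvStepB (pvMaps items).1 (pvMaps items).2) (acc, buf))).map
            String.toList).flatten
        = (acc.map String.toList).flatten
          ++ (match buf with
              | none => pvLoopA items t
              | some p => pvLoopA items (p :: t)) := by
  intro t
  induction t with
  | nil =>
    intro acc buf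
    cases buf with
    | none => simp [pvFlush, pvLoopA_nil]
    | some p => simp [pvFlush, pvSingle_eq]
  | cons c rest ih =>
    intro acc buf
    cases buf with
    | none =>
      simp only [List.foldl_cons, pvStepB]
      exact ih acc (some c)
    | some p =>
      have h2 : (String.ofList [p, c]).toList.length = 2 := by simp
      show _ = (acc.map String.toList).flatten ++ pvLoopA items (p :: c :: rest)
      rw [show pvLoopA items (p :: c :: rest)
            = let current_pair := String.ofList (p :: (c :: rest).take 1)
              if current_pair ∈ items.map (·.2) then
                (((items.find? (fun kv => kv.2 == current_pair)).map (·.1)).getD "").toList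
                  ++ pvLoopA items ((c :: rest).drop 1)
              else if String.ofList [p] ∈ items.map (·.2) then
                (((items.find? (fun kv => kv.2 == String.ofList [p])).map (·.1)).getD "").toList
                  ++ pvLoopA items (c :: rest)
              else
                p :: pvLoopA items (c :: rest) from by rw [pvLoopA]]
      simp only [List.take_succ_cons, List.take_zero, List.drop_succ_cons, List.drop_zero,
        List.foldl_cons, pvStepB]
      rw [pvPairs_get? items _ h2]
      cases h : items.find? (fun kv => kv.2 == String.ofList [p, c]) with
      | some kv =>
        have hm : String.ofList [p, c] ∈ items.map (·.2) := by
          simp [pvMem_values_iff, pvFirstKey, h]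
        simp only [pvFirstKey, h, Option.map_some, Option.getD_some]
        rw [ih (acc ++ [kv.1]) none]
        simp [hm]
      | none =>
        have hm : ¬ (String.ofList [p, c] ∈ items.map (·.2)) := by
          simp [pvMem_values_iff, pvFirstKey, h]
        simp only [pvFirstKey, h, Option.map_none, Option.getD_none]
        rw [ih (acc ++ [((pvMaps items).2.get? (String.ofList [p])).getD (String.ofList [p])])
              (some c)]
        have hs := pvSingle_eq items p
        by_cases hm1 : String.ofList [p] ∈ items.map (·.2)
        · simp only [if_neg hm, if_pos hm1]
          rw [pvLoopA] at hs
          simp only [List.take_nil, List.drop_nil, hm1, if_pos] at hs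
          simp [hs, pvLoopA_nil]
        · simp only [if_neg hm, if_neg hm1]
          rw [pvLoopA] at hs
          simp only [List.take_nil, List.drop_nil, hm1, if_neg, not_false_iff] at hs
          simp [hs, pvLoopA_nil]

-- ===== VERDICT (by name: the statement is the Claim_ definition above) =====
theorem replace_indigenous_with_latin_spec : Claim_equal_replace_indigenous_with_latin := by
  intro text characters_dict _
  unfold Spec_replace_indigenous_with_latin replace_indigenous_with_latin replace_indigenous_with_latin_alt
  set items := (PySem.Dict.ofList characters_dict).items with hi
  have h := pvFoldB_eq items text.toList [] none
  simp only [List.map_nil, List.flatten_nil, List.nil_append] at h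
  have hjoin : (PySem.Str.join ""
      (pvFlush (pvMaps items).2
        (text.toList.foldl (pvStepB (pvMaps items).1 (pvMaps items).2) ([], none)))).toList
      = pvLoopA items text.toList := by
    rw [PySem.Str.toList_join]
    simpa [pvJoinNil_flatten] using h
  rw [← hjoin, String.ofList_toList]
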